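-- pv_equiv track=rewrite | github.com/yingzhuo1994/AlgoExpert | assessments/LongestStreakOfAdjacentOnes.py | longestStreakOfAdjacentOnes
-- ===== SOURCE A (Python) =====
-- def longestStreakOfAdjacentOnes(array):
--     possibleIdx = -1
--     largestLength = 0
--     frontIdx = -1
--     frontLength = -1
--     for i, num in enumerate(array):
--         if num == 0:
--             backLength = i - frontIdx - 1
--             length = frontLength + backLength + 1
--             if length > largestLength:
--                 largestLength = length
--                 possibleIdx = frontIdx
--             frontLength = backLength
--             frontIdx = i
--
--     backLength = len(array) - frontIdx - 1
--     length = frontLength + backLength + 1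
--     if length > largestLength:
--         largestLength = length
--         possibleIdx = frontIdx
--
--     return possibleIdx
-- ===== SOURCE B (Python) =====
-- def longestStreakOfAdjacentOnes(array):
--     zeros = [i for i, num in enumerate(array) if num == 0]
--     bounds = [-1] + zeros + [len(array)]
--     possibleIdx = -1
--     largestLength = 0
--     for prev, cur, nxt in zip(bounds, bounds[1:], bounds[2:]):
--         length = nxt - prev - 1
--         if length > largestLength:
--             largestLength = length
--             possibleIdx = cur
--     return possibleIdx
-- ===== Notes on version B (the rewrite author's own statement) =====
-- stated objective: simpler
-- what changed: B first collects the zero indices, wraps them with sentinel bounds -1 and len(array), and scans consecutive bound triples with length = nxt - prev - 1, instead of A's single pass that threads frontIdx/frontLength state through every element and needs a duplicated post-loop block.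
import Mathlib
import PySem

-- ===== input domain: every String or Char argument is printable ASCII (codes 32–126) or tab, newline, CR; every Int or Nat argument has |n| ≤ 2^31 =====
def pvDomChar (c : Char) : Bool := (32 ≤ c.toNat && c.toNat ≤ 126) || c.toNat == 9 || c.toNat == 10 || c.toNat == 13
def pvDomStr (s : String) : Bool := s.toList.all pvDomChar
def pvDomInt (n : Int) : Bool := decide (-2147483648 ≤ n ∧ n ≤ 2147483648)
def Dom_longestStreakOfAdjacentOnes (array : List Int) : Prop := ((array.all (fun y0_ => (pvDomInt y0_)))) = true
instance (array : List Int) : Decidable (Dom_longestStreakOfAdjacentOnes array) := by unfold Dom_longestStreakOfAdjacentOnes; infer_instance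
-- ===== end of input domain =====

-- B replaces A's state-threading single pass (frontIdx/frontLength plus a duplicated
-- post-loop block) by collecting the zero indices, wrapping them with sentinel bounds
-- -1 and len(array), and scanning consecutive bound triples; objective: simpler.

-- ===== PORT A =====
-- loop body of A's for-loop; state = (possibleIdx, largestLength, frontIdx, frontLength)
def stepA (st : Int × Int × Int × Int) (p : Int × Int) : Int × Int × Int × Int :=
  if p.2 = 0 then
    let backLength := p.1 - st.2.2.1 - 1
    let length := st.2.2.2 + backLength + 1
    if length > st.2.1 then (st.2.2.1, length, p.1, backLength)
    else (st.1, st.2.1, p.1, backLength)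
  else st

def longestStreakOfAdjacentOnes (array : List Int) : Int :=
  let s := (PySem.List.enumerate array).foldl stepA (-1, 0, -1, -1)
  let backLength := (array.length : Int) - s.2.2.1 - 1
  let length := s.2.2.2 + backLength + 1
  if length > s.2.1 then s.2.2.1 else s.1

-- ===== PORT B =====
-- loop body of B's for-loop; state = (possibleIdx, largestLength), t = (prev, cur, nxt)
def stepB (st : Int × Int) (t : Int × Int × Int) : Int × Int :=
  let length := t.2.2 - t.1 - 1
  if length > st.2 then (t.2.1, length) else st

def longestStreakOfAdjacentOnes_alt (array : List Int) : Int :=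
  let zeros := ((PySem.List.enumerate array).filter (fun p => p.2 == 0)).map (fun p => p.1)
  let bounds := [(-1 : Int)] ++ zeros ++ [(array.length : Int)]
  -- zip(bounds, bounds[1:], bounds[2:]): the slices bounds[1:], bounds[2:] are exactly drop 1 / drop 2
  let s := (bounds.zip ((bounds.drop 1).zip (bounds.drop 2))).foldl stepB (-1, 0)
  s.1

-- ===== PRECONDITION & SPEC =====
def Spec_longestStreakOfAdjacentOnes (array : List Int) (out : Int) : Prop := out = longestStreakOfAdjacentOnes_alt array
instance (array : List Int) (out : Int) : Decidable (Spec_longestStreakOfAdjacentOnes array out) := by unfold Spec_longestStreakOfAdjacentOnes; infer_instance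

-- ===== CLAIM (what is proved, stated in full; the proofs are below) =====
def Claim_equal_longestStreakOfAdjacentOnes : Prop := ∀ (array : List Int), Dom_longestStreakOfAdjacentOnes array → Spec_longestStreakOfAdjacentOnes array (longestStreakOfAdjacentOnes array)

-- ===== LEMMAS AND PROOFS =====

-- A's step restricted to the zero entries (the pair always has second component 0)
def stepZ (st : Int × Int × Int × Int) (i : Int) : Int × Int × Int × Int :=
  stepA st (i, 0)

-- A's post-loop block
def finA (n : Int) (s : Int × Int × Int × Int) : Int :=
  if s.2.2.2 + (n - s.2.2.1 - 1) + 1 > s.2.1 then s.2.2.1 else s.1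

-- consecutive triples of the bounds list q :: c :: xs
def mkTriples (q c : Int) : List Int → List (Int × Int × Int)
  | [] => []
  | x :: xs => (q, c, x) :: mkTriples c x xs

-- A's fold only acts at the zero entries
lemma foldl_stepA_filter : ∀ (l : List (Int × Int)) (st : Int × Int × Int × Int),
    l.foldl stepA st = ((l.filter (fun p => p.2 == 0)).map (fun p => p.1)).foldl stepZ st := by
  intro l
  induction l with
  | nil => intro st; rfl
  | cons p l ih =>
    intro st
    by_cases h : p.2 = 0
    · have e1 : stepA st p = stepZ st p.1 := by simp [stepA, stepZ, h]
      simp [h, e1, ih]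
    · have e1 : stepA st p = st := by simp [stepA, h]
      simp [h, e1, ih]

-- main algebra: A's threaded fold + post-block equals B's triple scan, where the
-- previous bound is recovered as frontIdx - frontLength - 1
lemma finA_foldl_stepZ : ∀ (rest : List Int) (p L fi fl n : Int),
    finA n (rest.foldl stepZ (p, L, fi, fl))
      = ((mkTriples (fi - fl - 1) fi (rest ++ [n])).foldl stepB (p, L)).1 := by
  intro rest
  induction rest with
  | nil =>
    intro p L fi fl n
    simp only [List.foldl_nil, List.nil_append, mkTriples, List.foldl_cons, finA, stepB]
    split_ifs <;> first | rfl | omega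
  | cons r rs ih =>
    intro p L fi fl n
    simp only [List.foldl_cons, List.cons_append, mkTriples]
    have hfi : r - (r - fi - 1) - 1 = fi := by ring
    by_cases h : fl + (r - fi - 1) + 1 > L
    · have hs : stepZ (p, L, fi, fl) r = (fi, fl + (r - fi - 1) + 1, r, r - fi - 1) := by
        simp [stepZ, stepA, h]
      have hb : stepB (p, L) (fi - fl - 1, fi, r) = (fi, fl + (r - fi - 1) + 1) := by
        simp only [stepB]
        rw [if_pos (by omega)]
        have : r - (fi - fl - 1) - 1 = fl + (r - fi - 1) + 1 := by ring
        rw [this]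
      rw [hs, hb, ih]
      try rw [hfi]
    · have hs : stepZ (p, L, fi, fl) r = (p, L, r, r - fi - 1) := by
        simp [stepZ, stepA, h]
      have hb : stepB (p, L) (fi - fl - 1, fi, r) = (p, L) := by
        simp only [stepB]
        rw [if_neg (by omega)]
      rw [hs, hb, ih]
      try rw [hfi]

-- the zip of bounds with its two tails is exactly the list of consecutive triples
lemma zip_eq_mkTriples : ∀ (xs : List Int) (q c : Int),
    (q :: c :: xs).zip ((c :: xs).zip xs) = mkTriples q c xs := by
  intro xs
  induction xs with
  | nil => intro q c; rfl
  | cons x xs ih =>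
    intro q c
    simpa [mkTriples] using congrArg (List.cons (q, c, x)) (ih c x)

-- the zero indices are ≥ 0, < length, and strictly increasing
lemma zeros_bounds (array : List Int) :
    (∀ z ∈ ((PySem.List.enumerate array).filter (fun p => p.2 == 0)).map (fun p => p.1),
        0 ≤ z ∧ z < (array.length : Int))
    ∧ (((PySem.List.enumerate array).filter (fun p => p.2 == 0)).map (fun p => p.1)).Pairwise (· < ·) := by
  constructor
  · intro z hz
    simp only [List.mem_map, List.mem_filter] at hz
    obtain ⟨p, ⟨hp, _⟩, rfl⟩ := hz
    rw [PySem.List.mem_enumerate_iff] at hp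
    obtain ⟨k, hk, rfl⟩ := hp
    constructor
    · simp
    · simp; exact_mod_cast hk
  · have h := PySem.List.pairwise_lt_enumerate (xs := array) (s := 0)
    exact (h.filter _).map _ (fun a b hab => hab)

-- ===== VERDICT (by name: the statement is the Claim_ definition above) =====
theorem longestStreakOfAdjacentOnes_spec : Claim_equal_longestStreakOfAdjacentOnes := by
  intro array _
  unfold Spec_longestStreakOfAdjacentOnes
  obtain ⟨hmem, hpair⟩ := zeros_bounds array
  simp only [longestStreakOfAdjacentOnes, longestStreakOfAdjacentOnes_alt]
  rw [foldl_stepA_filter]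
  revert hmem hpair
  generalize ((PySem.List.enumerate array).filter (fun p => p.2 == 0)).map (fun p => p.1) = zeros
  generalize (array.length : Int) = n
  intro hmem hpair
  cases zeros with
  | nil =>
    simp only [List.foldl_nil, List.nil_append, List.cons_append,
      List.drop_succ_cons, List.drop_nil, List.drop_zero, List.zip_nil_right]
    split_ifs <;> rfl
  | cons z1 rest =>
    obtain ⟨hz1a, hz1b⟩ := hmem z1 (by simp)
    show finA n ((z1 :: rest).foldl stepZ (-1, 0, -1, -1)) = _
    have hstep : stepZ (-1, 0, -1, -1) z1 = (-1, z1, z1, z1) := by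
      simp only [stepZ, stepA]
      norm_num
      all_goals omega
    rw [List.foldl_cons, hstep, finA_foldl_stepZ]
    have hq : z1 - z1 - 1 = -1 := by ring
    rw [hq]
    simp only [List.cons_append, List.nil_append, List.drop_succ_cons, List.drop_zero]
    rw [zip_eq_mkTriples]
    obtain ⟨h, t, hht, hgt⟩ : ∃ h t, rest ++ [n] = h :: t ∧ z1 < h := by
      cases rest with
      | nil => exact ⟨n, [], rfl, hz1b⟩
      | cons z2 rs => exact ⟨z2, rs ++ [n], rfl, (List.pairwise_cons.mp hpair).1 z2 (by simp)⟩
    rw [hht]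
    simp only [mkTriples, List.foldl_cons]
    have h1 : stepB (-1, z1) (-1, z1, h) = (z1, h) := by
      simp only [stepB]; rw [if_pos (by omega)]; norm_num
    have h2 : stepB (-1, 0) (-1, z1, h) = (z1, h) := by
      simp only [stepB]; rw [if_pos (by omega)]; norm_num
    rw [h1, h2]
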